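-- pv_equiv track=rewrite | github.com/anthliu/PSGI | psgi/envs/ai2thor/entity_constants.py | find_compat_clusters
-- ===== SOURCE A (Python) =====
-- def find_compat_clusters(obj_to_recep):
--   c_objs = []
--   c_recep_sets = []
--   for obj, receps in obj_to_recep.items():
--     receps = set(receps)
--     found_cluster = -1
--     for i, c_receps in enumerate(c_recep_sets):
--       if receps == c_receps:
--         found_cluster = i
--         break
--     if found_cluster < 0:
--       c_objs.append([obj])
--       c_recep_sets.append(receps)
--     else:
--       c_objs[found_cluster].append(obj)
--   return c_objs, c_recep_sets
-- ===== SOURCE B (Python) =====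
-- def find_compat_clusters(obj_to_recep):
--   # Staged passes: materialize (obj, recep-set) pairs once, dedupe the sets in
--   # first-seen order, then gather each cluster's objects with a grouping comprehension.
--   keyed = [(obj, set(receps)) for obj, receps in obj_to_recep.items()]
--   c_recep_sets = []
--   for _, rs in keyed:
--     if rs not in c_recep_sets:
--       c_recep_sets.append(rs)
--   c_objs = [[obj for obj, rs2 in keyed if rs2 == rs] for rs in c_recep_sets]
--   return c_objs, c_recep_sets
-- ===== Notes on version B (the rewrite author's own statement) =====
-- stated objective: alternative
-- what changed: Replaces A's single pass that grows clusters in place via an indexed append with staged passes: build (obj, set) pairs once, dedupe the sets in first-seen order, then collect each cluster's objects with a grouping comprehension.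
import Mathlib
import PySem

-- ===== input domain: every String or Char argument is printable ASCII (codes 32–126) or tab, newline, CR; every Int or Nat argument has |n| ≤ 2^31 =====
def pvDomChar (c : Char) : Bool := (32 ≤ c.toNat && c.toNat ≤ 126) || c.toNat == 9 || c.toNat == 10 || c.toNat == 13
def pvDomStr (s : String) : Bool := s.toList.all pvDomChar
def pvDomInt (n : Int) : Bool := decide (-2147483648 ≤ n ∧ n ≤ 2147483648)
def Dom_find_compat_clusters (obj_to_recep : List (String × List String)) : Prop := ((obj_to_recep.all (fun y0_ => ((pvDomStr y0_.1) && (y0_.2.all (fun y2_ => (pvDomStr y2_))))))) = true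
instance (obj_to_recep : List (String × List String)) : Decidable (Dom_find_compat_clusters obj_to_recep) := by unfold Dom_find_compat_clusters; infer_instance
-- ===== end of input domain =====

-- B replaces A's single pass (that grows clusters in place by an indexed append) with
-- staged passes: build (obj, set) pairs once, dedupe the sets in first-seen order,
-- then gather each cluster's objects with a grouping comprehension (objective: alternative).

-- ===== PORT A =====
-- 'for i, c_receps in enumerate(c_recep_sets): if receps == c_receps: found_cluster = i; break'
def pvFindIdx (r : PySem.Set String) (sets : List (PySem.Set String)) (i : Int) : Int :=
  match sets with
  | [] => -1
  | c :: rest => if PySem.Set.equal r c then i else pvFindIdx r rest (i + 1)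

-- 'c_objs[found_cluster].append(obj)' (found_cluster is a valid index when reached)
def pvAppendAt (xss : List (List String)) (j : Nat) (x : String) : List (List String) :=
  match xss, j with
  | [], _ => []
  | ys :: rest, 0 => (ys ++ [x]) :: rest
  | ys :: rest, Nat.succ j' => ys :: pvAppendAt rest j' x

def pvStepA (st : List (List String) × List (List String)) (p : String × List String) :
    List (List String) × List (List String) :=
  let receps : PySem.Set String := PySem.Set.ofList p.2
  let found := pvFindIdx receps st.2 0
  if found < 0 then (st.1 ++ [[p.1]], st.2 ++ [receps])
  else (pvAppendAt st.1 found.toNat p.1, st.2)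

def find_compat_clusters (obj_to_recep : List (String × List String)) :
    List (List String) × List (List String) :=
  ((PySem.Dict.ofList obj_to_recep).items).foldl pvStepA ([], [])

-- ===== PORT B =====
-- '(obj, set(receps))'
def pvKey (p : String × List String) : String × PySem.Set String :=
  (p.1, PySem.Set.ofList p.2)

-- 'if rs not in c_recep_sets: c_recep_sets.append(rs)'
def pvDedupStep (acc : List (PySem.Set String)) (p : String × PySem.Set String) :
    List (PySem.Set String) :=
  if acc.any (fun c => PySem.Set.equal p.2 c) then acc else acc ++ [p.2]

def find_compat_clusters_alt (obj_to_recep : List (String × List String)) :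
    List (List String) × List (List String) :=
  let keyed := ((PySem.Dict.ofList obj_to_recep).items).map pvKey
  let csets := keyed.foldl pvDedupStep []
  (csets.map (fun rs => (keyed.filter (fun q => PySem.Set.equal q.2 rs)).map Prod.fst), csets)

-- ===== PRECONDITION & SPEC =====
def Spec_find_compat_clusters (obj_to_recep : List (String × List String)) (out : List (List String) × List (List String)) : Prop := out = find_compat_clusters_alt obj_to_recep
instance (obj_to_recep : List (String × List String)) (out : List (List String) × List (List String)) : Decidable (Spec_find_compat_clusters obj_to_recep out) := by unfold Spec_find_compat_clusters; infer_instance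

-- ===== CLAIM (what is proved, stated in full; the proofs are below) =====
def Claim_equal_find_compat_clusters : Prop := ∀ (obj_to_recep : List (String × List String)), Dom_find_compat_clusters obj_to_recep → Spec_find_compat_clusters obj_to_recep (find_compat_clusters obj_to_recep)

-- ===== LEMMAS AND PROOFS =====

theorem pvEqRefl (a : PySem.Set String) : PySem.Set.equal a a = true :=
  (PySem.Set.equal_iff a a).mpr (fun _ => Iff.rfl)

theorem pvEqSymm {a b : PySem.Set String} (h : PySem.Set.equal a b = true) :
    PySem.Set.equal b a = true :=
  (PySem.Set.equal_iff b a).mpr (fun x => ((PySem.Set.equal_iff a b).mp h x).symm)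

theorem pvEqTrans {a b c : PySem.Set String} (h1 : PySem.Set.equal a b = true)
    (h2 : PySem.Set.equal b c = true) : PySem.Set.equal a c = true :=
  (PySem.Set.equal_iff a c).mpr
    (fun x => ((PySem.Set.equal_iff a b).mp h1 x).trans ((PySem.Set.equal_iff b c).mp h2 x))

-- index of the first set equal (as a set) to r, if any
def pvFirst (r : PySem.Set String) : List (PySem.Set String) → Option Nat
  | [] => none
  | c :: rest => if PySem.Set.equal r c then some 0 else (pvFirst r rest).map (· + 1)

theorem pvFindIdx_eq (r : PySem.Set String) (sets : List (PySem.Set String)) (i : Int) :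
    pvFindIdx r sets i = match pvFirst r sets with | none => -1 | some j => i + j := by
  induction sets generalizing i with
  | nil => simp [pvFindIdx, pvFirst]
  | cons c rest ih =>
    by_cases h : PySem.Set.equal r c = true
    · simp [pvFindIdx, pvFirst, h]
    · simp only [pvFindIdx, pvFirst, h, if_neg, Bool.not_eq_true, ih]
      cases hf : pvFirst r rest with
      | none => rfl
      | some v =>
        show i + 1 + (v : Int) = i + ((v + 1 : Nat) : Int)
        push_cast; ring

theorem pvFirst_none_iff (r : PySem.Set String) (sets : List (PySem.Set String)) :
    pvFirst r sets = none ↔ ∀ s ∈ sets, PySem.Set.equal r s = false := by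
  induction sets with
  | nil => simp [pvFirst]
  | cons c rest ih =>
    constructor
    · intro hf t ht
      by_cases h : PySem.Set.equal r c = true
      · simp [pvFirst, h] at hf
      · simp only [pvFirst, h, if_neg, Bool.not_eq_true, Option.map_eq_none_iff] at hf
        rcases List.mem_cons.mp ht with hteq | ht'
        · subst hteq; exact Bool.eq_false_iff.mpr h
        · exact ih.mp hf t ht'
    · intro hall
      have h : PySem.Set.equal r c = false := hall c (by simp)
      have ht : pvFirst r rest = none := ih.mpr (fun t ht => hall t (by simp [ht]))
      simp [pvFirst, h, ht]

theorem pvFirst_some_mem (r : PySem.Set String) (sets : List (PySem.Set String)) (j : Nat)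
    (hf : pvFirst r sets = some j) :
    ∃ c ∈ sets, PySem.Set.equal r c = true := by
  induction sets generalizing j with
  | nil => simp [pvFirst] at hf
  | cons c rest ih =>
    by_cases h : PySem.Set.equal r c = true
    · exact ⟨c, by simp, h⟩
    · simp only [pvFirst, h, if_neg, Bool.not_eq_true, Option.map_eq_some_iff] at hf
      obtain ⟨j', hj', -⟩ := hf
      obtain ⟨d, hd, he⟩ := ih j' hj'
      exact ⟨d, by simp [hd], he⟩

-- appending x into the j-th group, expressed as a map over the (pairwise inequivalent) sets
theorem pvAppendAt_map (r : PySem.Set String) (x : String)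
    (F : PySem.Set String → List String) (sets : List (PySem.Set String)) (j : Nat)
    (hf : pvFirst r sets = some j)
    (hpw : List.Pairwise (fun a b => PySem.Set.equal a b = false) sets) :
    pvAppendAt (sets.map F) j x
      = sets.map (fun rs => F rs ++ if PySem.Set.equal r rs then [x] else []) := by
  induction sets generalizing j with
  | nil => simp [pvFirst] at hf
  | cons c rest ih =>
    by_cases h : PySem.Set.equal r c = true
    · have hj : j = 0 := by simp [pvFirst, h] at hf; omega
      subst hj
      have hrest : ∀ rs ∈ rest, PySem.Set.equal r rs = false := by
        intro rs hrs
        by_contra hne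
        have htr : PySem.Set.equal c rs = true :=
          pvEqTrans (pvEqSymm h) (Bool.eq_false_iff.not_left.mp hne)
        have := (List.pairwise_cons.mp hpw).1 rs hrs
        rw [this] at htr; exact Bool.false_ne_true htr
      simp only [List.map_cons, pvAppendAt, h, if_pos]
      congr 1
      apply (List.map_congr_left ?_).symm
      intro rs hrs
      simp [hrest rs hrs]
    · obtain ⟨j', hj', rfl⟩ : ∃ j', pvFirst r rest = some j' ∧ j = j' + 1 := by
        simp only [pvFirst, h, if_neg, Bool.not_eq_true, Option.map_eq_some_iff] at hf
        obtain ⟨j', hj', he⟩ := hf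
        exact ⟨j', hj', he.symm⟩
      simp only [List.map_cons, pvAppendAt]
      rw [ih j' hj' (List.pairwise_cons.mp hpw).2]
      simp [Bool.eq_false_iff.mpr h]

-- the loop invariant: A's state after the prefix ps equals B's staged computation on ps
def pvInv (ps : List (String × List String)) (st : List (List String) × List (List String)) : Prop :=
  st.2 = (ps.map pvKey).foldl pvDedupStep [] ∧
  st.1 = st.2.map (fun rs => ((ps.map pvKey).filter (fun q => PySem.Set.equal q.2 rs)).map Prod.fst) ∧
  List.Pairwise (fun a b => PySem.Set.equal a b = false) st.2 ∧
  (∀ q ∈ ps.map pvKey, ∃ c ∈ st.2, PySem.Set.equal q.2 c = true)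

theorem pvStep_inv (ps : List (String × List String)) (p : String × List String)
    (st : List (List String) × List (List String)) (h : pvInv ps st) :
    pvInv (ps ++ [p]) (pvStepA st p) := by
  obtain ⟨hsets, hobjs, hpw, hcov⟩ := h
  set r : PySem.Set String := PySem.Set.ofList p.2 with hrdef
  have hmap : (ps ++ [p]).map pvKey = ps.map pvKey ++ [(p.1, r)] := by
    simp [pvKey, hrdef]
  -- the grouping function after / before adding p
  set G : PySem.Set String → List String :=
    fun rs => ((ps.map pvKey).filter (fun q => PySem.Set.equal q.2 rs)).map Prod.fst with hGdef
  have hfilter : ∀ rs : PySem.Set String,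
      (((ps ++ [p]).map pvKey).filter (fun q => PySem.Set.equal q.2 rs)).map Prod.fst
        = G rs ++ (if PySem.Set.equal r rs then [p.1] else []) := by
    intro rs
    rw [hmap, List.filter_append, List.map_append, hGdef]
    congr 1
    by_cases h : PySem.Set.equal r rs = true <;> simp [List.filter, h]
  cases hf : pvFirst r st.2 with
  | none =>
    have hall : ∀ s ∈ st.2, PySem.Set.equal r s = false := (pvFirst_none_iff r st.2).mp hf
    have hA : pvStepA st p = (st.1 ++ [[p.1]], st.2 ++ [r]) := by
      simp [pvStepA, pvFindIdx_eq, hf, ← hrdef]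
    rw [hA]
    have hany : st.2.any (fun c => PySem.Set.equal r c) = false := by
      rw [List.any_eq_false]; intro c hc; simp [hall c hc]
    refine ⟨?_, ?_, ?_, ?_⟩
    · show st.2 ++ [r] = ((ps ++ [p]).map pvKey).foldl pvDedupStep []
      rw [hmap, List.foldl_append, ← hsets]
      simp [pvDedupStep, hany]
    · show st.1 ++ [[p.1]] = (st.2 ++ [r]).map
        (fun rs => (((ps ++ [p]).map pvKey).filter (fun q => PySem.Set.equal q.2 rs)).map Prod.fst)
      rw [List.map_append]
      congr 1
      · -- old clusters unchanged
        rw [hobjs]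
        apply List.map_congr_left
        intro rs hrs
        rw [hfilter rs, hall rs hrs]
        simp
      · -- the new cluster holds exactly p.1
        have hempty : (ps.map pvKey).filter (fun q => PySem.Set.equal q.2 r) = [] := by
          rw [List.filter_eq_nil_iff]
          intro q hq
          obtain ⟨c, hc, he⟩ := hcov q hq
          intro habs
          have : PySem.Set.equal r c = true := pvEqTrans (pvEqSymm habs) he
          rw [hall c hc] at this
          exact Bool.false_ne_true this
        rw [List.map_singleton, hfilter r, hGdef]
        simp [hempty, pvEqRefl]
    · rw [List.pairwise_append]
      refine ⟨hpw, by simp, ?_⟩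
      intro a ha b hb
      simp only [List.mem_singleton] at hb
      subst hb
      by_contra hne
      have : PySem.Set.equal r a = true := pvEqSymm (Bool.eq_false_iff.not_left.mp hne)
      rw [hall a ha] at this
      exact Bool.false_ne_true this
    · intro q hq
      rw [hmap] at hq
      rcases List.mem_append.mp hq with hq | hq
      · obtain ⟨c, hc, he⟩ := hcov q hq
        exact ⟨c, by simp [hc], he⟩
      · simp only [List.mem_singleton] at hq
        subst hq
        exact ⟨r, by simp, pvEqRefl r⟩
  | some j =>
    obtain ⟨c, hc, he⟩ := pvFirst_some_mem r st.2 j hf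
    have hA : pvStepA st p = (pvAppendAt st.1 j p.1, st.2) := by
      rw [pvStepA, pvFindIdx_eq]; simp [hf, ← hrdef]
    rw [hA]
    have hany : st.2.any (fun c => PySem.Set.equal r c) = true :=
      List.any_eq_true.mpr ⟨c, hc, he⟩
    refine ⟨?_, ?_, hpw, ?_⟩
    · show st.2 = ((ps ++ [p]).map pvKey).foldl pvDedupStep []
      rw [hmap, List.foldl_append, ← hsets]
      simp [pvDedupStep, hany]
    · show pvAppendAt st.1 j p.1 = st.2.map
        (fun rs => (((ps ++ [p]).map pvKey).filter (fun q => PySem.Set.equal q.2 rs)).map Prod.fst)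
      rw [hobjs, pvAppendAt_map r p.1 G st.2 j hf hpw]
      apply List.map_congr_left
      intro rs _
      exact (hfilter rs).symm
    · intro q hq
      rw [hmap] at hq
      rcases List.mem_append.mp hq with hq | hq
      · exact hcov q hq
      · simp only [List.mem_singleton] at hq
        subst hq
        exact ⟨c, hc, he⟩

theorem pvInv_foldl (ps : List (String × List String)) :
    pvInv ps (ps.foldl pvStepA ([], [])) := by
  induction ps using List.reverseRecOn with
  | nil => exact ⟨rfl, rfl, List.Pairwise.nil, by simp⟩
  | append_singleton ps p ih =>
    rw [List.foldl_append]
    exact pvStep_inv ps p _ ih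

-- ===== VERDICT (by name: the statement is the Claim_ definition above) =====
theorem find_compat_clusters_spec : Claim_equal_find_compat_clusters := by
  intro l _
  obtain ⟨hsets, hobjs, -, -⟩ := pvInv_foldl ((PySem.Dict.ofList l).items)
  show find_compat_clusters l
      = (((((PySem.Dict.ofList l).items).map pvKey).foldl pvDedupStep []).map
           (fun rs => ((((PySem.Dict.ofList l).items).map pvKey).filter
             (fun q => PySem.Set.equal q.2 rs)).map Prod.fst),
         (((PySem.Dict.ofList l).items).map pvKey).foldl pvDedupStep [])
  rw [← hsets]
  exact Prod.ext hobjs rfl
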